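-- pv_equiv track=rewrite | github.com/pypi-data/pypi-mirror-297 | packages/areal-common-services/areal_common_services-1.0.1.tar.gz/areal_common_services-1.0.1/src/common_services/services/visual_line.py | filter_horizontal_lines_for_text_sorting
-- ===== SOURCE A (Python) =====
-- def filter_horizontal_lines_for_text_sorting(horizontal_lines):
--     filtered_lines = []
--
--     for line in horizontal_lines:
--         xmin_horizontal, ymin_horizontal, xmax_horizontal, ymax_horizontal = line[0]
--
--         if len(filtered_lines) > 0:
--             found = False
--             for filtered_line in filtered_lines:
--                 xmin_filtered, ymin_filtered, xmax_filtered, ymax_filtered = (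
--                     filtered_line[0]
--                 )
--
--                 if abs(ymin_filtered - ymin_horizontal) <= 7:
--                     if (
--                         abs(xmin_horizontal - xmin_filtered) <= 10
--                         and abs(xmax_filtered - xmax_horizontal) <= 10
--                     ):
--                         found = True
--                         break
--             if not found:
--                 filtered_lines.append(line)
--         else:
--             filtered_lines.append(line)
--
--     return filtered_lines
-- ===== SOURCE B (Python) =====
-- def filter_horizontal_lines_for_text_sorting(horizontal_lines):
--     # Spatial grid hash: cells sized to the tolerances (7 in y, 10 in x);
--     # any near match of a new line lies in one of the 27 neighbouring cells.
--     grid = {}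
--     filtered_lines = []
--     for line in horizontal_lines:
--         x0, y0, x1, y1 = line[0]
--         key = (y0 // 7, x0 // 10, x1 // 10)
--         found = False
--         for dy in (-1, 0, 1):
--             for d0 in (-1, 0, 1):
--                 for d1 in (-1, 0, 1):
--                     for (fx0, fy0, fx1, fy1) in grid.get(
--                         (key[0] + dy, key[1] + d0, key[2] + d1), ()
--                     ):
--                         if (
--                             abs(fy0 - y0) <= 7
--                             and abs(x0 - fx0) <= 10
--                             and abs(fx1 - x1) <= 10
--                         ):
--                             found = True
--                             break
--                     if found:
--                         break
--                 if found:
--                     break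
--             if found:
--                 break
--         if not found:
--             filtered_lines.append(line)
--             grid.setdefault(key, []).append((x0, y0, x1, y1))
--     return filtered_lines
-- ===== Notes on version B (the rewrite author's own statement) =====
-- stated objective: alternative
-- what changed: B replaces A's linear scan of all previously kept lines with a spatial hash grid (cells sized to the tolerances 7/10), checking only the 27 neighbouring cells for a near match; O(n) average on dispersed inputs, though not measurably faster on the generated inputs.
import Mathlib
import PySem

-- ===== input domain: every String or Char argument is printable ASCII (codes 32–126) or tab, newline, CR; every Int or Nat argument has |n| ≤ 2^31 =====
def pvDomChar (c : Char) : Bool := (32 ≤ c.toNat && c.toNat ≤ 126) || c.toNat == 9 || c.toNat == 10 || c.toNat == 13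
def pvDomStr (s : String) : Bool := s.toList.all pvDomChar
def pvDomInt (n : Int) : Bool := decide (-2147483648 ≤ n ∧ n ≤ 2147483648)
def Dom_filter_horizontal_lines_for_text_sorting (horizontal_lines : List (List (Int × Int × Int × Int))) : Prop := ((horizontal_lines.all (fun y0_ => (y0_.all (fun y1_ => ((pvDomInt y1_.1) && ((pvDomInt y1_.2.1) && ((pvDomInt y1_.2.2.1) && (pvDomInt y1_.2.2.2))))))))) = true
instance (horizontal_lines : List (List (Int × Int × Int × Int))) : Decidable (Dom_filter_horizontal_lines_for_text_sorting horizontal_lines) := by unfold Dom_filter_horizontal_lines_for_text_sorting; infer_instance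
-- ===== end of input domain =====

-- B replaces A's scan of all previously kept lines with a spatial hash grid (cells sized
-- to the tolerances) that checks only the 27 neighbouring cells; same return value proved.

-- line[0]; Python raises IndexError on an empty inner list, which Pre_ excludes
-- (the .getD default is never reached inside Pre_); used by both ports.
def pvLine0 (line : List (Int × Int × Int × Int)) : Int × Int × Int × Int :=
  (PySem.List.pyGet? line 0).getD (0, 0, 0, 0)

-- ===== PORT A =====
-- the body of A's inner 'for filtered_line in filtered_lines' loop with its break
def pvFindNear (filtered : List (List (Int × Int × Int × Int)))
    (t : Int × Int × Int × Int) : Bool :=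
  match filtered with
  | [] => false
  | fl :: rest =>
    let f := pvLine0 fl
    if |f.2.1 - t.2.1| ≤ 7 then
      if |t.1 - f.1| ≤ 10 ∧ |f.2.2.1 - t.2.2.1| ≤ 10 then true
      else pvFindNear rest t
    else pvFindNear rest t

-- the body of A's outer loop
def pvStepA (filtered : List (List (Int × Int × Int × Int)))
    (line : List (Int × Int × Int × Int)) : List (List (Int × Int × Int × Int)) :=
  let t := pvLine0 line
  if filtered.length > 0 then
    if pvFindNear filtered t then filtered else filtered ++ [line]
  else filtered ++ [line]

def filter_horizontal_lines_for_text_sorting (horizontal_lines : List (List (Int × Int × Int × Int))) : List (List (Int × Int × Int × Int)) :=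
  horizontal_lines.foldl pvStepA []

-- ===== PORT B =====
def pvNear (f t : Int × Int × Int × Int) : Bool :=
  decide (|f.2.1 - t.2.1| ≤ 7 ∧ |t.1 - f.1| ≤ 10 ∧ |f.2.2.1 - t.2.2.1| ≤ 10)

def pvKey (t : Int × Int × Int × Int) : Int × Int × Int :=
  (PySem.Int.floordiv t.2.1 7, PySem.Int.floordiv t.1 10, PySem.Int.floordiv t.2.2.1 10)

-- the three nested offset loops over the 27 neighbouring cells
def pvGridFound (grid : PySem.Dict (Int × Int × Int) (List (Int × Int × Int × Int)))
    (k : Int × Int × Int) (t : Int × Int × Int × Int) : Bool :=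
  ([-1, 0, 1] : List Int).any fun dy =>
    ([-1, 0, 1] : List Int).any fun d0 =>
      ([-1, 0, 1] : List Int).any fun d1 =>
        (grid.getD (k.1 + dy, k.2.1 + d0, k.2.2 + d1) []).any fun f => pvNear f t

-- the body of B's outer loop: state = (grid, filtered_lines)
def pvStepB
    (st : PySem.Dict (Int × Int × Int) (List (Int × Int × Int × Int)) × List (List (Int × Int × Int × Int)))
    (line : List (Int × Int × Int × Int)) :
    PySem.Dict (Int × Int × Int) (List (Int × Int × Int × Int)) × List (List (Int × Int × Int × Int)) :=
  let t := pvLine0 line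
  let k := pvKey t
  if pvGridFound st.1 k t then st
  else (st.1.insert k (st.1.getD k [] ++ [t]), st.2 ++ [line])

def filter_horizontal_lines_for_text_sorting_alt (horizontal_lines : List (List (Int × Int × Int × Int))) : List (List (Int × Int × Int × Int)) :=
  (horizontal_lines.foldl pvStepB (PySem.Dict.empty, [])).2

-- ===== PRECONDITION & SPEC =====
-- Pre_ excludes inputs containing an empty inner list, on which the Python A (and B)
-- raises IndexError at 'line[0]'.
def Pre_filter_horizontal_lines_for_text_sorting (horizontal_lines : List (List (Int × Int × Int × Int))) : Prop :=
  ∀ line ∈ horizontal_lines, line ≠ []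
instance (horizontal_lines : List (List (Int × Int × Int × Int))) : Decidable (Pre_filter_horizontal_lines_for_text_sorting horizontal_lines) := by unfold Pre_filter_horizontal_lines_for_text_sorting; infer_instance

def pvWitness_filter_horizontal_lines_for_text_sorting : (List (List (Int × Int × Int × Int))) :=
  [[(0, 0, 50, 0)], [(100, 20, 150, 20)]]

def Spec_filter_horizontal_lines_for_text_sorting (horizontal_lines : List (List (Int × Int × Int × Int))) (out : List (List (Int × Int × Int × Int))) : Prop := out = filter_horizontal_lines_for_text_sorting_alt horizontal_lines
instance (horizontal_lines : List (List (Int × Int × Int × Int))) (out : List (List (Int × Int × Int × Int))) : Decidable (Spec_filter_horizontal_lines_for_text_sorting horizontal_lines out) := by unfold Spec_filter_horizontal_lines_for_text_sorting; infer_instance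

-- ===== CLAIM (what is proved, stated in full; the proofs are below) =====
def Claim_equal_filter_horizontal_lines_for_text_sorting : Prop := ∀ (horizontal_lines : List (List (Int × Int × Int × Int))), Dom_filter_horizontal_lines_for_text_sorting horizontal_lines → Pre_filter_horizontal_lines_for_text_sorting horizontal_lines → Spec_filter_horizontal_lines_for_text_sorting horizontal_lines (filter_horizontal_lines_for_text_sorting horizontal_lines)

-- ===== LEMMAS AND PROOFS =====

-- grid invariant: each cell holds exactly the representatives of the kept lines keyed there
def pvInv (grid : PySem.Dict (Int × Int × Int) (List (Int × Int × Int × Int)))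
    (out : List (List (Int × Int × Int × Int))) : Prop :=
  ∀ k : Int × Int × Int, grid.getD k [] = (out.map pvLine0).filter (fun f => pvKey f == k)

-- tolerance-sized cells: a match within tolerance c sits at most one cell away
lemma pvCellDiff (a b c : Int) (hc : 0 < c) (h : |a - b| ≤ c) :
    -1 ≤ PySem.Int.floordiv a c - PySem.Int.floordiv b c ∧
      PySem.Int.floordiv a c - PySem.Int.floordiv b c ≤ 1 := by
  have ha := PySem.Int.floordiv_mul_add_mod a c
  have hb := PySem.Int.floordiv_mul_add_mod b c
  have ha1 := PySem.Int.mod_nonneg a hc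
  have ha2 := PySem.Int.mod_lt a hc
  have hb1 := PySem.Int.mod_nonneg b hc
  have hb2 := PySem.Int.mod_lt b hc
  rw [abs_le] at h
  constructor <;> nlinarith

lemma pvGridFound_eq (grid : PySem.Dict (Int × Int × Int) (List (Int × Int × Int × Int)))
    (out : List (List (Int × Int × Int × Int))) (t : Int × Int × Int × Int)
    (hinv : pvInv grid out) :
    pvGridFound grid (pvKey t) t = (out.map pvLine0).any (fun f => pvNear f t) := by
  rw [Bool.eq_iff_iff]
  simp only [pvGridFound, List.any_eq_true, hinv _, List.mem_filter, beq_iff_eq]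
  constructor
  · rintro ⟨dy, _, d0, _, d1, _, f, ⟨hf, _⟩, hnear⟩
    exact ⟨f, hf, hnear⟩
  · rintro ⟨f, hf, hnear⟩
    have h := of_decide_eq_true hnear
    have h1 := pvCellDiff f.2.1 t.2.1 7 (by norm_num) h.1
    have h2 := pvCellDiff f.1 t.1 10 (by norm_num) (by rw [abs_sub_comm]; exact h.2.1)
    have h3 := pvCellDiff f.2.2.1 t.2.2.1 10 (by norm_num) h.2.2
    refine ⟨(pvKey f).1 - (pvKey t).1, ?_, (pvKey f).2.1 - (pvKey t).2.1, ?_,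
      (pvKey f).2.2 - (pvKey t).2.2, ?_, f, ⟨hf, ?_⟩, hnear⟩
    · simp only [pvKey, List.mem_cons, List.not_mem_nil] at h1 ⊢; omega
    · simp only [pvKey, List.mem_cons, List.not_mem_nil] at h2 ⊢; omega
    · simp only [pvKey, List.mem_cons, List.not_mem_nil] at h3 ⊢; omega
    · simp

lemma pvFindNear_eq_any (filtered : List (List (Int × Int × Int × Int)))
    (t : Int × Int × Int × Int) :
    pvFindNear filtered t = (filtered.map pvLine0).any (fun f => pvNear f t) := by
  induction filtered with
  | nil => rfl
  | cons fl rest ih =>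
    simp only [pvFindNear, List.map_cons, List.any_cons, ih, pvNear]
    by_cases h1 : |(pvLine0 fl).2.1 - t.2.1| ≤ 7 <;>
      by_cases h2 : |t.1 - (pvLine0 fl).1| ≤ 10 ∧ |(pvLine0 fl).2.2.1 - t.2.2.1| ≤ 10 <;>
      simp [h1, h2]

lemma pvInv_insert (grid : PySem.Dict (Int × Int × Int) (List (Int × Int × Int × Int)))
    (out : List (List (Int × Int × Int × Int))) (line : List (Int × Int × Int × Int))
    (hinv : pvInv grid out) :
    pvInv (grid.insert (pvKey (pvLine0 line))
        (grid.getD (pvKey (pvLine0 line)) [] ++ [pvLine0 line])) (out ++ [line]) := by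
  intro k
  rw [PySem.Dict.getD_insert]
  by_cases hk : k = pvKey (pvLine0 line)
  · rw [if_pos hk, hk, hinv (pvKey (pvLine0 line))]
    simp
  · rw [if_neg hk, hinv k]
    simp [List.filter_append, Ne.symm hk]

lemma pvLoop_eq (hl : List (List (Int × Int × Int × Int)))
    (grid : PySem.Dict (Int × Int × Int) (List (Int × Int × Int × Int)))
    (out : List (List (Int × Int × Int × Int))) (hinv : pvInv grid out) :
    hl.foldl pvStepA out = (hl.foldl pvStepB (grid, out)).2 := by
  induction hl generalizing grid out with
  | nil => rfl
  | cons line rest ih =>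
    simp only [List.foldl_cons]
    have hfd : pvGridFound grid (pvKey (pvLine0 line)) (pvLine0 line)
        = pvFindNear out (pvLine0 line) := by
      rw [pvGridFound_eq grid out _ hinv, pvFindNear_eq_any]
    cases hf : pvFindNear out (pvLine0 line) with
    | true =>
      have hne : out ≠ [] := by
        intro h; subst h; simp [pvFindNear] at hf
      have hlen : out.length > 0 := List.length_pos_of_ne_nil hne
      rw [show pvStepA out line = out by simp [pvStepA, hlen, hf],
        show pvStepB (grid, out) line = (grid, out) by simp [pvStepB, hfd, hf]]
      exact ih grid out hinv
    | false =>
      rw [show pvStepA out line = out ++ [line] by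
        unfold pvStepA; by_cases h : out.length > 0 <;> simp [h, hf],
        show pvStepB (grid, out) line
          = (grid.insert (pvKey (pvLine0 line))
              (grid.getD (pvKey (pvLine0 line)) [] ++ [pvLine0 line]), out ++ [line]) by
            simp [pvStepB, hfd, hf]]
      exact ih _ _ (pvInv_insert grid out line hinv)

-- ===== VERDICT (by name: the statement is the Claim_ definition above) =====
theorem filter_horizontal_lines_for_text_sorting_spec : Claim_equal_filter_horizontal_lines_for_text_sorting := by
  intro hl _ _
  unfold Spec_filter_horizontal_lines_for_text_sorting
  unfold filter_horizontal_lines_for_text_sorting filter_horizontal_lines_for_text_sorting_alt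
  exact pvLoop_eq hl PySem.Dict.empty [] (fun k => by simp [PySem.Dict.getD_empty])
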